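-- pv_equiv track=rewrite | github.com/codbcks/coin-detection | CS373_coin_detection.py | computeBoundingBoxBoundaries
-- ===== SOURCE A (Python) =====
-- def computeBoundingBoxBoundaries(label_image, label_count, image_width, image_height):
--
--     bounding_box_list = []
--
--     min_x = {label: image_width for label in label_count}
--     min_y = {label: image_height for label in label_count}
--     max_x = {label: 0 for label in label_count}
--     max_y = {label: 0 for label in label_count}
--
--     for i in range(image_height):
--         for j in range(image_width):
--             label = label_image[i][j]
--             if label > 0:
--                 if j < min_x[label]:
--                     min_x[label] = j
--                 if j > max_x[label]:
--                     max_x[label] = j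
--                 if i < min_y[label]:
--                     min_y[label] = i
--                 if i > max_y[label]:
--                     max_y[label] = i
--
--     for label in label_count:
--         bounding_box = [min_x[label], min_y[label], max_x[label], max_y[label]]
--         bounding_box_list.append(bounding_box)
--
--     return bounding_box_list
-- ===== SOURCE B (Python) =====
-- def computeBoundingBoxBoundaries(label_image, label_count, image_width, image_height):
--     xs = {}
--     ys = {}
--     for i in range(image_height):
--         for j in range(image_width):
--             label = label_image[i][j]
--             if label > 0:
--                 xs.setdefault(label, []).append(j)
--                 ys.setdefault(label, []).append(i)
--     return [[min(xs.get(label, []), default=image_width),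
--              min(ys.get(label, []), default=image_height),
--              max(xs.get(label, []), default=0),
--              max(ys.get(label, []), default=0)]
--             for label in label_count]
-- ===== Notes on version B (the rewrite author's own statement) =====
-- stated objective: simpler
-- what changed: Instead of mutating four pre-initialised running-min/max dicts per pixel, B collects each positive pixel's coordinates into per-label lists in one scan and reduces each list with min/max using default= for labels without pixels; Pre_ excludes only inputs where A raises (out-of-bounds rows/columns, or a positive pixel label missing from label_count, a KeyError).
import Mathlib
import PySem

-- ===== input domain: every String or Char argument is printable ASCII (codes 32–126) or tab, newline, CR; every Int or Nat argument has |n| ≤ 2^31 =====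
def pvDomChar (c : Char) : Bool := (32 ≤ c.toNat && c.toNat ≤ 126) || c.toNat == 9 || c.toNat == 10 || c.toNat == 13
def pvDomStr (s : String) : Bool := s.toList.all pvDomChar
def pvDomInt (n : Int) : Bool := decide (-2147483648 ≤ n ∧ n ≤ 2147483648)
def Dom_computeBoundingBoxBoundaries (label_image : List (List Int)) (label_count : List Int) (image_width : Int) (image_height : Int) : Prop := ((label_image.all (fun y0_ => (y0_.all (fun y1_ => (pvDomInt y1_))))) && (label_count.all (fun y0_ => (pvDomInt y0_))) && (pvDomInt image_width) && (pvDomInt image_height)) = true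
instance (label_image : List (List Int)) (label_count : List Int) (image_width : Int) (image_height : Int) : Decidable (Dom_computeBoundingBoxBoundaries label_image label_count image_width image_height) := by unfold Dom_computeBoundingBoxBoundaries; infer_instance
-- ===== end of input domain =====

-- B replaces the four dict-mutating running min/max of A by one pixel scan that groups
-- coordinates into per-label lists, then reduces each list with min/max-with-default
-- (objective: simpler); equal wherever the Python A returns.

-- ===== PORT A =====
-- shared transliteration of the expression `label_image[i][j]`; the .getD defaults are
-- never reached on Pre_ (in-bounds indexing), where Python would raise IndexError.
def pvPix (label_image : List (List Int)) (i j : Int) : Int :=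
  (PySem.List.pyGet? ((PySem.List.pyGet? label_image i).getD []) j).getD 0

-- one iteration of A's inner pixel loop over the state (min_x, min_y, max_x, max_y);
-- the dict lookups `min_x[label]` … are ported as `.getD _ 0`: exact whenever the key is
-- present (guaranteed on Pre_), where Python would raise KeyError.
def pvStepA (label_image : List (List Int))
    (st : PySem.Dict Int Int × PySem.Dict Int Int × PySem.Dict Int Int × PySem.Dict Int Int)
    (i j : Int) :
    PySem.Dict Int Int × PySem.Dict Int Int × PySem.Dict Int Int × PySem.Dict Int Int :=
  let label := pvPix label_image i j
  if 0 < label then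
    (if j < st.1.getD label 0 then st.1.insert label j else st.1,
     if i < st.2.1.getD label 0 then st.2.1.insert label i else st.2.1,
     if st.2.2.1.getD label 0 < j then st.2.2.1.insert label j else st.2.2.1,
     if st.2.2.2.getD label 0 < i then st.2.2.2.insert label i else st.2.2.2)
  else st

def computeBoundingBoxBoundaries (label_image : List (List Int)) (label_count : List Int) (image_width : Int) (image_height : Int) : List (List Int) :=
  let min_x := label_count.foldl (fun d l => d.insert l image_width) PySem.Dict.empty
  let min_y := label_count.foldl (fun d l => d.insert l image_height) PySem.Dict.empty
  let max_x := label_count.foldl (fun d l => d.insert l (0 : Int)) PySem.Dict.empty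
  let max_y := label_count.foldl (fun d l => d.insert l (0 : Int)) PySem.Dict.empty
  let st := (PySem.List.pyRange 0 image_height 1).foldl (fun st i =>
      (PySem.List.pyRange 0 image_width 1).foldl (fun st j => pvStepA label_image st i j) st)
    (min_x, min_y, max_x, max_y)
  label_count.foldl (fun acc l =>
    acc ++ [[st.1.getD l 0, st.2.1.getD l 0, st.2.2.1.getD l 0, st.2.2.2.getD l 0]]) []

-- ===== PORT B =====
def pvMinD (xs : List Int) (d : Int) : Int :=    -- min(xs, default=d)
  match xs with | [] => d | x :: t => t.foldl min x
def pvMaxD (xs : List Int) (d : Int) : Int :=    -- max(xs, default=d)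
  match xs with | [] => d | x :: t => t.foldl max x

-- one iteration of B's pixel loop: `xs.setdefault(label, []).append(j)` is exactly
-- `xs[label] = xs.get(label, []) + [j]`, i.e. Dict.modify.
def pvStepB (label_image : List (List Int))
    (st : PySem.Dict Int (List Int) × PySem.Dict Int (List Int)) (i j : Int) :
    PySem.Dict Int (List Int) × PySem.Dict Int (List Int) :=
  let label := pvPix label_image i j
  if 0 < label then
    (st.1.modify label [] (· ++ [j]), st.2.modify label [] (· ++ [i]))
  else st

def computeBoundingBoxBoundaries_alt (label_image : List (List Int)) (label_count : List Int) (image_width : Int) (image_height : Int) : List (List Int) :=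
  let xy := (PySem.List.pyRange 0 image_height 1).foldl (fun st i =>
      (PySem.List.pyRange 0 image_width 1).foldl (fun st j => pvStepB label_image st i j) st)
    (PySem.Dict.empty, PySem.Dict.empty)
  label_count.map (fun label =>
    [pvMinD (xy.1.getD label []) image_width,
     pvMinD (xy.2.getD label []) image_height,
     pvMaxD (xy.1.getD label []) 0,
     pvMaxD (xy.2.getD label []) 0])

-- ===== PRECONDITION & SPEC =====
-- Exactly the inputs where Python A returns: when the pixel loop runs (0 < width), the
-- scanned rows must exist and be wide enough (else IndexError) and every positive scanned
-- label must occur in label_count (else KeyError).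
def Pre_computeBoundingBoxBoundaries (label_image : List (List Int)) (label_count : List Int) (image_width : Int) (image_height : Int) : Prop :=
  0 < image_width →
    (image_height.toNat ≤ label_image.length ∧
     ∀ row ∈ label_image.take image_height.toNat,
       image_width.toNat ≤ row.length ∧
       ∀ v ∈ row.take image_width.toNat, 0 < v → v ∈ label_count)
instance (label_image : List (List Int)) (label_count : List Int) (image_width : Int) (image_height : Int) : Decidable (Pre_computeBoundingBoxBoundaries label_image label_count image_width image_height) := by unfold Pre_computeBoundingBoxBoundaries; infer_instance

def pvWitness_computeBoundingBoxBoundaries : List (List Int) × List Int × Int × Int :=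
  ([[1, 0], [0, 2]], [1, 2], 2, 2)

def Spec_computeBoundingBoxBoundaries (label_image : List (List Int)) (label_count : List Int) (image_width : Int) (image_height : Int) (out : List (List Int)) : Prop := out = computeBoundingBoxBoundaries_alt label_image label_count image_width image_height
instance (label_image : List (List Int)) (label_count : List Int) (image_width : Int) (image_height : Int) (out : List (List Int)) : Decidable (Spec_computeBoundingBoxBoundaries label_image label_count image_width image_height out) := by unfold Spec_computeBoundingBoxBoundaries; infer_instance

-- ===== CLAIM (what is proved, stated in full; the proofs are below) =====
def Claim_equal_computeBoundingBoxBoundaries : Prop := ∀ (label_image : List (List Int)) (label_count : List Int) (image_width : Int) (image_height : Int), Dom_computeBoundingBoxBoundaries label_image label_count image_width image_height → Pre_computeBoundingBoxBoundaries label_image label_count image_width image_height → Spec_computeBoundingBoxBoundaries label_image label_count image_width image_height (computeBoundingBoxBoundaries label_image label_count image_width image_height)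

-- ===== LEMMAS AND PROOFS =====

-- the flattened pixel traversal, in the common row-major order
def pvPixels (image_width image_height : Int) : List (Int × Int) :=
  (PySem.List.pyRange 0 image_height 1).flatMap (fun i =>
    (PySem.List.pyRange 0 image_width 1).map (fun j => (i, j)))

-- the column / row coordinates of label l among pixels P
def pvJs (label_image : List (List Int)) (P : List (Int × Int)) (l : Int) : List Int :=
  P.filterMap (fun p => if 0 < l ∧ pvPix label_image p.1 p.2 = l then some p.2 else none)
def pvIs (label_image : List (List Int)) (P : List (Int × Int)) (l : Int) : List Int :=
  P.filterMap (fun p => if 0 < l ∧ pvPix label_image p.1 p.2 = l then some p.1 else none)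

def pvRunMin (a : Int) (xs : List Int) : Int := xs.foldl (fun v x => if x < v then x else v) a
def pvRunMax (a : Int) (xs : List Int) : Int := xs.foldl (fun v x => if v < x then x else v) a

lemma pv_foldl_foldl_flatMap {α β γ : Type} (f : γ → α → β → γ) (g : α → List β)
    (L : List α) (init : γ) :
    L.foldl (fun s a => (g a).foldl (fun s b => f s a b) s) init
      = (L.flatMap (fun a => (g a).map (fun b => (a, b)))).foldl (fun s p => f s p.1 p.2) init := by
  induction L generalizing init with
  | nil => rfl
  | cons a t ih =>
      simp only [List.foldl_cons, List.flatMap_cons, List.foldl_append, List.foldl_map]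
      exact ih _

lemma pv_getD_eq {d : PySem.Dict Int Int} {l a : Int} (h : d.get? l = some a) :
    d.getD l 0 = a := by
  simp [PySem.Dict.getD, h]

-- A's pixel fold, observed at a key l that is present in all four dicts
lemma pv_stepA_fold_get (label_image : List (List Int)) (l : Int) (P : List (Int × Int)) :
    ∀ (mx my Mx My : PySem.Dict Int Int) (a b c e : Int),
      mx.get? l = some a → my.get? l = some b → Mx.get? l = some c → My.get? l = some e →
      ((P.foldl (fun st p => pvStepA label_image st p.1 p.2) (mx, my, Mx, My)).1.get? l
          = some (pvRunMin a (pvJs label_image P l)) ∧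
       (P.foldl (fun st p => pvStepA label_image st p.1 p.2) (mx, my, Mx, My)).2.1.get? l
          = some (pvRunMin b (pvIs label_image P l)) ∧
       (P.foldl (fun st p => pvStepA label_image st p.1 p.2) (mx, my, Mx, My)).2.2.1.get? l
          = some (pvRunMax c (pvJs label_image P l)) ∧
       (P.foldl (fun st p => pvStepA label_image st p.1 p.2) (mx, my, Mx, My)).2.2.2.get? l
          = some (pvRunMax e (pvIs label_image P l))) := by
  induction P with
  | nil => intro mx my Mx My a b c e ha hb hc he; simp [pvJs, pvIs, pvRunMin, pvRunMax, ha, hb, hc, he]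
  | cons p t ih =>
      intro mx my Mx My a b c e ha hb hc he
      by_cases hpos : 0 < pvPix label_image p.1 p.2
      · by_cases heq : pvPix label_image p.1 p.2 = l
        · -- the pixel carries label l : all four dicts are updated at key l
          have hl : 0 < l := heq ▸ hpos
          have hJ : pvJs label_image (p :: t) l = p.2 :: pvJs label_image t l := by
            simp [pvJs, hl, heq]
          have hI : pvIs label_image (p :: t) l = p.1 :: pvIs label_image t l := by
            simp [pvIs, hl, heq]
          have hstep : pvStepA label_image (mx, my, Mx, My) p.1 p.2 =
              (if p.2 < a then mx.insert l p.2 else mx,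
               if p.1 < b then my.insert l p.1 else my,
               if c < p.2 then Mx.insert l p.2 else Mx,
               if e < p.1 then My.insert l p.1 else My) := by
            simp only [pvStepA, heq, hl, if_pos,
              pv_getD_eq ha, pv_getD_eq hb, pv_getD_eq hc, pv_getD_eq he]
          have ha' : (if p.2 < a then mx.insert l p.2 else mx).get? l
              = some (if p.2 < a then p.2 else a) := by
            split_ifs with h1 <;> simp [PySem.Dict.get?_insert_self, ha]
          have hb' : (if p.1 < b then my.insert l p.1 else my).get? l
              = some (if p.1 < b then p.1 else b) := by
            split_ifs with h1 <;> simp [PySem.Dict.get?_insert_self, hb]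
          have hc' : (if c < p.2 then Mx.insert l p.2 else Mx).get? l
              = some (if c < p.2 then p.2 else c) := by
            split_ifs with h1 <;> simp [PySem.Dict.get?_insert_self, hc]
          have he' : (if e < p.1 then My.insert l p.1 else My).get? l
              = some (if e < p.1 then p.1 else e) := by
            split_ifs with h1 <;> simp [PySem.Dict.get?_insert_self, he]
          have := ih _ _ _ _ _ _ _ _ ha' hb' hc' he'
          simpa [List.foldl_cons, hstep, hJ, hI, pvRunMin, pvRunMax] using this
        · -- a foreign positive label : possible inserts, but never at key l
          have hJ : pvJs label_image (p :: t) l = pvJs label_image t l := by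
            simp [pvJs, heq]
          have hI : pvIs label_image (p :: t) l = pvIs label_image t l := by
            simp [pvIs, heq]
          have hne : l ≠ pvPix label_image p.1 p.2 := fun h => heq h.symm
          have ha' : (pvStepA label_image (mx, my, Mx, My) p.1 p.2).1.get? l = some a := by
            simp only [pvStepA, hpos, if_pos]
            split_ifs <;> simp [PySem.Dict.get?_insert_of_ne _ _ hne, ha]
          have hb' : (pvStepA label_image (mx, my, Mx, My) p.1 p.2).2.1.get? l = some b := by
            simp only [pvStepA, hpos, if_pos]
            split_ifs <;> simp [PySem.Dict.get?_insert_of_ne _ _ hne, hb]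
          have hc' : (pvStepA label_image (mx, my, Mx, My) p.1 p.2).2.2.1.get? l = some c := by
            simp only [pvStepA, hpos, if_pos]
            split_ifs <;> simp [PySem.Dict.get?_insert_of_ne _ _ hne, hc]
          have he' : (pvStepA label_image (mx, my, Mx, My) p.1 p.2).2.2.2.get? l = some e := by
            simp only [pvStepA, hpos, if_pos]
            split_ifs <;> simp [PySem.Dict.get?_insert_of_ne _ _ hne, he]
          have := ih (pvStepA label_image (mx, my, Mx, My) p.1 p.2).1
            (pvStepA label_image (mx, my, Mx, My) p.1 p.2).2.1
            (pvStepA label_image (mx, my, Mx, My) p.1 p.2).2.2.1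
            (pvStepA label_image (mx, my, Mx, My) p.1 p.2).2.2.2
            a b c e ha' hb' hc' he'
          simpa [List.foldl_cons, hJ, hI] using this
      · -- non-positive pixel : nothing happens, nothing is collected
        have hJ : pvJs label_image (p :: t) l = pvJs label_image t l := by
          by_cases hl : 0 < l
          · have : pvPix label_image p.1 p.2 ≠ l := fun h => hpos (h ▸ hl)
            simp [pvJs, this]
          · simp [pvJs, hl]
        have hI : pvIs label_image (p :: t) l = pvIs label_image t l := by
          by_cases hl : 0 < l
          · have : pvPix label_image p.1 p.2 ≠ l := fun h => hpos (h ▸ hl)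
            simp [pvIs, this]
          · simp [pvIs, hl]
        have hstep : pvStepA label_image (mx, my, Mx, My) p.1 p.2 = (mx, my, Mx, My) := by
          simp [pvStepA, hpos]
        rw [List.foldl_cons, hstep, hJ, hI]
        exact ih _ _ _ _ _ _ _ _ ha hb hc he

-- B's pixel fold, observed at any key l: the two dicts accumulate exactly the
-- coordinate lists pvJs / pvIs
lemma pv_stepB_fold_getD (label_image : List (List Int)) (l : Int) (P : List (Int × Int)) :
    ∀ (dx dy : PySem.Dict Int (List Int)),
      ((P.foldl (fun st p => pvStepB label_image st p.1 p.2) (dx, dy)).1.getD l []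
          = dx.getD l [] ++ pvJs label_image P l ∧
       (P.foldl (fun st p => pvStepB label_image st p.1 p.2) (dx, dy)).2.getD l []
          = dy.getD l [] ++ pvIs label_image P l) := by
  induction P with
  | nil => intro dx dy; simp [pvJs, pvIs]
  | cons p t ih =>
      intro dx dy
      by_cases hpos : 0 < pvPix label_image p.1 p.2
      · by_cases heq : pvPix label_image p.1 p.2 = l
        · have hl : 0 < l := heq ▸ hpos
          have hJ : pvJs label_image (p :: t) l = p.2 :: pvJs label_image t l := by
            simp [pvJs, hl, heq]
          have hI : pvIs label_image (p :: t) l = p.1 :: pvIs label_image t l := by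
            simp [pvIs, hl, heq]
          have hstep : pvStepB label_image (dx, dy) p.1 p.2 =
              (dx.modify l [] (· ++ [p.2]), dy.modify l [] (· ++ [p.1])) := by
            simp [pvStepB, hl, heq]
          obtain ⟨h1, h2⟩ := ih (dx.modify l [] (· ++ [p.2])) (dy.modify l [] (· ++ [p.1]))
          rw [List.foldl_cons, hstep, hJ, hI]
          constructor
          · rw [h1, PySem.Dict.getD_modify_self]; simp
          · rw [h2, PySem.Dict.getD_modify_self]; simp
        · have hJ : pvJs label_image (p :: t) l = pvJs label_image t l := by
            simp [pvJs, heq]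
          have hI : pvIs label_image (p :: t) l = pvIs label_image t l := by
            simp [pvIs, heq]
          have hne : l ≠ pvPix label_image p.1 p.2 := fun h => heq h.symm
          have hstep : pvStepB label_image (dx, dy) p.1 p.2 =
              (dx.modify (pvPix label_image p.1 p.2) [] (· ++ [p.2]),
               dy.modify (pvPix label_image p.1 p.2) [] (· ++ [p.1])) := by
            simp [pvStepB, hpos]
          obtain ⟨h1, h2⟩ := ih (dx.modify (pvPix label_image p.1 p.2) [] (· ++ [p.2]))
            (dy.modify (pvPix label_image p.1 p.2) [] (· ++ [p.1]))
          rw [List.foldl_cons, hstep, hJ, hI]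
          constructor
          · rw [h1, PySem.Dict.getD_modify_of_ne _ _ _ hne]
          · rw [h2, PySem.Dict.getD_modify_of_ne _ _ _ hne]
      · have hJ : pvJs label_image (p :: t) l = pvJs label_image t l := by
          by_cases hl : 0 < l
          · have : pvPix label_image p.1 p.2 ≠ l := fun h => hpos (h ▸ hl)
            simp [pvJs, this]
          · simp [pvJs, hl]
        have hI : pvIs label_image (p :: t) l = pvIs label_image t l := by
          by_cases hl : 0 < l
          · have : pvPix label_image p.1 p.2 ≠ l := fun h => hpos (h ▸ hl)
            simp [pvIs, this]
          · simp [pvIs, hl]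
        have hstep : pvStepB label_image (dx, dy) p.1 p.2 = (dx, dy) := by
          simp [pvStepB, hpos]
        rw [List.foldl_cons, hstep, hJ, hI]
        exact ih dx dy

lemma pv_init_get (lc : List Int) (v : Int) :
    ∀ (d : PySem.Dict Int Int) (l : Int), (l ∈ lc ∨ d.get? l = some v) →
      (lc.foldl (fun d x => d.insert x v) d).get? l = some v := by
  induction lc with
  | nil => intro d l h; simpa using h.resolve_left (by simp)
  | cons x t ih =>
      intro d l h
      rw [List.foldl_cons]
      by_cases hx : l = x
      · subst hx
        by_cases ht : l ∈ t
        · exact ih _ _ (Or.inl ht)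
        · exact ih _ _ (Or.inr (PySem.Dict.get?_insert_self _ _ _))
      · rcases h with h | h
        · rcases List.mem_cons.mp h with h | h
          · exact absurd h hx
          · exact ih _ _ (Or.inl h)
        · exact ih _ _ (Or.inr (by rw [PySem.Dict.get?_insert_of_ne _ _ hx]; exact h))

lemma pv_runMin_eq_pvMinD (xs : List Int) (a : Int) (h : ∀ x ∈ xs, x < a) :
    pvRunMin a xs = pvMinD xs a := by
  have hmin : pvRunMin a xs = xs.foldl min a := by
    have : (fun (v x : Int) => if x < v then x else v) = fun (v x : Int) => min v x := by
      funext v x; simp only [min_def]; split_ifs <;> omega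
    unfold pvRunMin; rw [this]
  rw [hmin]
  cases xs with
  | nil => rfl
  | cons x t =>
      have : min a x = x := by
        have := h x (by simp); simp [min_def]; omega
      simp [pvMinD, List.foldl_cons, this]

lemma pv_runMax_eq_pvMaxD (xs : List Int) (a : Int) (h : ∀ x ∈ xs, a ≤ x) :
    pvRunMax a xs = pvMaxD xs a := by
  have hmax : pvRunMax a xs = xs.foldl max a := by
    have : (fun (v x : Int) => if v < x then x else v) = fun (v x : Int) => max v x := by
      funext v x; simp only [max_def]; split_ifs <;> omega
    unfold pvRunMax; rw [this]
  rw [hmax]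
  cases xs with
  | nil => rfl
  | cons x t =>
      have : max a x = x := by
        have := h x (by simp); simp [max_def]; omega
      simp [pvMaxD, List.foldl_cons, this]

lemma pv_mem_pixels {image_width image_height : Int} {p : Int × Int}
    (h : p ∈ pvPixels image_width image_height) :
    0 ≤ p.1 ∧ p.1 < image_height ∧ 0 ≤ p.2 ∧ p.2 < image_width := by
  rcases List.mem_flatMap.mp h with ⟨i, hi, hp⟩
  rcases List.mem_map.mp hp with ⟨j, hj, rfl⟩
  rcases (PySem.List.mem_pyRange_one).mp hi with ⟨h1, h2⟩
  rcases (PySem.List.mem_pyRange_one).mp hj with ⟨h3, h4⟩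
  exact ⟨h1, h2, h3, h4⟩

lemma pv_mem_pvJs {label_image : List (List Int)} {P : List (Int × Int)} {l x : Int}
    (h : x ∈ pvJs label_image P l) : ∃ p ∈ P, p.2 = x := by
  rcases List.mem_filterMap.mp h with ⟨p, hp, hx⟩
  refine ⟨p, hp, ?_⟩
  by_cases hc : 0 < l ∧ pvPix label_image p.1 p.2 = l <;> simp [hc] at hx
  exact hx

lemma pv_mem_pvIs {label_image : List (List Int)} {P : List (Int × Int)} {l x : Int}
    (h : x ∈ pvIs label_image P l) : ∃ p ∈ P, p.1 = x := by
  rcases List.mem_filterMap.mp h with ⟨p, hp, hx⟩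
  refine ⟨p, hp, ?_⟩
  by_cases hc : 0 < l ∧ pvPix label_image p.1 p.2 = l <;> simp [hc] at hx
  exact hx

-- ===== VERDICT (by name: the statement is the Claim_ definition above) =====
theorem computeBoundingBoxBoundaries_spec : Claim_equal_computeBoundingBoxBoundaries := by
  unfold Claim_equal_computeBoundingBoxBoundaries
  intro li lc w h _ _
  unfold Spec_computeBoundingBoxBoundaries
  unfold computeBoundingBoxBoundaries computeBoundingBoxBoundaries_alt
  simp only [PySem.List.foldl_append_singleton_eq_map]
  rw [pv_foldl_foldl_flatMap (fun st i j => pvStepA li st i j)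
      (fun _ => PySem.List.pyRange 0 w 1),
      pv_foldl_foldl_flatMap (fun st i j => pvStepB li st i j)
      (fun _ => PySem.List.pyRange 0 w 1), ← pvPixels]
  simp only [List.nil_append]
  refine List.map_congr_left (fun l hl => ?_)
  obtain ⟨h1, h2, h3, h4⟩ := pv_stepA_fold_get li l (pvPixels w h)
    (lc.foldl (fun d x => d.insert x w) PySem.Dict.empty)
    (lc.foldl (fun d x => d.insert x h) PySem.Dict.empty)
    (lc.foldl (fun d x => d.insert x (0 : Int)) PySem.Dict.empty)
    (lc.foldl (fun d x => d.insert x (0 : Int)) PySem.Dict.empty)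
    w h 0 0
    (pv_init_get lc w _ l (Or.inl hl)) (pv_init_get lc h _ l (Or.inl hl))
    (pv_init_get lc 0 _ l (Or.inl hl)) (pv_init_get lc 0 _ l (Or.inl hl))
  obtain ⟨hb1, hb2⟩ := pv_stepB_fold_getD li l (pvPixels w h) PySem.Dict.empty PySem.Dict.empty
  rw [pv_getD_eq h1, pv_getD_eq h2, pv_getD_eq h3, pv_getD_eq h4, hb1, hb2,
      PySem.Dict.getD_empty]
  simp only [List.nil_append]
  have hxs : ∀ x ∈ pvJs li (pvPixels w h) l, 0 ≤ x ∧ x < w := by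
    intro x hx
    rcases pv_mem_pvJs hx with ⟨p, hp, rfl⟩
    have := pv_mem_pixels hp; exact ⟨this.2.2.1, this.2.2.2⟩
  have hys : ∀ x ∈ pvIs li (pvPixels w h) l, 0 ≤ x ∧ x < h := by
    intro x hx
    rcases pv_mem_pvIs hx with ⟨p, hp, rfl⟩
    have := pv_mem_pixels hp; exact ⟨this.1, this.2.1⟩
  rw [pv_runMin_eq_pvMinD _ _ (fun x hx => (hxs x hx).2),
      pv_runMin_eq_pvMinD _ _ (fun x hx => (hys x hx).2),
      pv_runMax_eq_pvMaxD _ _ (fun x hx => (hxs x hx).1),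
      pv_runMax_eq_pvMaxD _ _ (fun x hx => (hys x hx).1)]
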